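-- pv_equiv track=rewrite | github.com/MangoGreenTeaz/new | scene_label.py | build_output_columns
-- ===== SOURCE A (Python) =====
-- SCENE_LABEL_COLUMN = "scene_label"
--
-- CORE_OUTPUT_COLUMNS = [
--     "time",
--     "udid",
--     "text",
--     SCENE_LABEL_COLUMN,
--     "city",
--     "context",
--     "history_usage",
--     "service_click",
-- ]
--
-- def build_output_columns(batch_columns: list[str], save_all_columns: bool) -> list[str]:
--     if not save_all_columns:
--         return [column for column in CORE_OUTPUT_COLUMNS if column in batch_columns]
--
--     ordered_columns = [column for column in batch_columns if column != SCENE_LABEL_COLUMN]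
--     if "text" in ordered_columns:
--         text_index = ordered_columns.index("text")
--         return [
--             *ordered_columns[: text_index + 1],
--             SCENE_LABEL_COLUMN,
--             *ordered_columns[text_index + 1 :],
--         ]
--
--     return [*ordered_columns, SCENE_LABEL_COLUMN]
-- ===== SOURCE B (Python) =====
-- SCENE_LABEL_COLUMN = "scene_label"
--
-- CORE_OUTPUT_COLUMNS = [
--     "time",
--     "udid",
--     "text",
--     SCENE_LABEL_COLUMN,
--     "city",
--     "context",
--     "history_usage",
--     "service_click",
-- ]
--
-- def build_output_columns(batch_columns: list[str], save_all_columns: bool) -> list[str]: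
--     if not save_all_columns:
--         return [column for column in CORE_OUTPUT_COLUMNS if column in batch_columns]
--
--     result = []
--     inserted = False
--     for column in batch_columns:
--         if column == SCENE_LABEL_COLUMN:
--             continue
--         result.append(column)
--         if column == "text" and not inserted:
--             result.append(SCENE_LABEL_COLUMN)
--             inserted = True
--     if not inserted:
--         result.append(SCENE_LABEL_COLUMN)
--     return result
-- ===== Notes on version B (the rewrite author's own statement) =====
-- stated objective: simpler
-- what changed: The save_all branch's remove-then-.index-then-splice logic is replaced by a single pass over batch_columns that skips scene_label and appends it right after the first 'text' (or at the end), tracked by an inserted flag.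
import Mathlib
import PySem

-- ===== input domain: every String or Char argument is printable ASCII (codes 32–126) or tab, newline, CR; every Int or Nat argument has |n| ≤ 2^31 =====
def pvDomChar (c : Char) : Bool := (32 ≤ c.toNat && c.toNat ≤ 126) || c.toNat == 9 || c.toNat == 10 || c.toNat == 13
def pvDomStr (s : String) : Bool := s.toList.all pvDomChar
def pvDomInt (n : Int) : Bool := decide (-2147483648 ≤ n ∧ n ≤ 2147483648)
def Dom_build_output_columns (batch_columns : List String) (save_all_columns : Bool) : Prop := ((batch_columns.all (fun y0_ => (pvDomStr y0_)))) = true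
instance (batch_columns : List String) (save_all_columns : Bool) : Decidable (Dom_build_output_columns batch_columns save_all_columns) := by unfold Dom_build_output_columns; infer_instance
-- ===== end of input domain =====

-- B replaces A's remove-then-.index-then-splice save_all branch with one construct-as-you-go pass
-- over batch_columns, inserting scene_label right after the first "text" via an inserted flag (objective: simpler).


-- ===== PORT A =====
def CORE_OUTPUT_COLUMNS : List String :=
  ["time", "udid", "text", "scene_label", "city", "context", "history_usage", "service_click"]

def build_output_columns (batch_columns : List String) (save_all_columns : Bool) : List String :=
  if !save_all_columns then
    CORE_OUTPUT_COLUMNS.filter (fun column => batch_columns.contains column)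
  else
    let ordered_columns := batch_columns.filter (fun column => column != "scene_label")
    if ordered_columns.contains "text" then
      match PySem.List.index? ordered_columns "text" with
      | some text_index =>
          PySem.List.slice ordered_columns none (some ((text_index : Int) + 1)) ++
            ["scene_label"] ++
            PySem.List.slice ordered_columns (some ((text_index : Int) + 1)) none
      | none => []  -- unreachable: "text" ∈ ordered_columns
    else
      ordered_columns ++ ["scene_label"]

-- ===== PORT B =====
-- the loop of Source B: skip scene_label, append each column, append scene_label after the first "text"
def bocGo : List String → Bool → List String
  | [], inserted => if inserted then [] else ["scene_label"]
  | column :: rest, inserted =>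
    if column == "scene_label" then bocGo rest inserted
    else if column == "text" && !inserted then column :: "scene_label" :: bocGo rest true
    else column :: bocGo rest inserted

def build_output_columns_alt (batch_columns : List String) (save_all_columns : Bool) : List String :=
  if !save_all_columns then
    CORE_OUTPUT_COLUMNS.filter (fun column => batch_columns.contains column)
  else
    bocGo batch_columns false

-- ===== PRECONDITION & SPEC =====
def Spec_build_output_columns (batch_columns : List String) (save_all_columns : Bool) (out : List String) : Prop := out = build_output_columns_alt batch_columns save_all_columns
instance (batch_columns : List String) (save_all_columns : Bool) (out : List String) : Decidable (Spec_build_output_columns batch_columns save_all_columns out) := by unfold Spec_build_output_columns; infer_instance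

-- ===== CLAIM (what is proved, stated in full; the proofs are below) =====
def Claim_equal_build_output_columns : Prop := ∀ (batch_columns : List String) (save_all_columns : Bool), Dom_build_output_columns batch_columns save_all_columns → Spec_build_output_columns batch_columns save_all_columns (build_output_columns batch_columns save_all_columns)

-- ===== LEMMAS AND PROOFS =====

-- "insert scene_label after the first text, or at the end": the common shape both branches reduce to
def insAfter : List String → List String
  | [] => ["scene_label"]
  | c :: r => if c = "text" then c :: "scene_label" :: r else c :: insAfter r

theorem bocGo_true (l : List String) :
    bocGo l true = l.filter (fun c => c != "scene_label") := by
  induction l with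
  | nil => rfl
  | cons c r ih =>
    simp only [bocGo, List.filter_cons]
    by_cases h : c = "scene_label" <;> simp [h, ih]

theorem bocGo_false (l : List String) :
    bocGo l false = insAfter (l.filter (fun c => c != "scene_label")) := by
  induction l with
  | nil => rfl
  | cons c r ih =>
    simp only [bocGo, List.filter_cons]
    by_cases h : c = "scene_label"
    · simp [h, ih]
    · by_cases ht : c = "text"
      · simp [ht, insAfter, bocGo_true]
      · simp [h, ht, insAfter, ih]

theorem splice_eq_insAfter (l : List String) :
    (if l.contains "text" then
      match PySem.List.index? l "text" with
      | some text_index =>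
          PySem.List.slice l none (some ((text_index : Int) + 1)) ++
            ["scene_label"] ++
            PySem.List.slice l (some ((text_index : Int) + 1)) none
      | none => []
    else l ++ ["scene_label"]) = insAfter l := by
  induction l with
  | nil => rfl
  | cons c r ih =>
    by_cases ht : c = "text"
    · subst ht
      rw [PySem.List.index?_cons_self]
      have h1 : ((0 : Nat) : Int) + 1 = ((1 : Nat) : Int) := by norm_num
      simp only [List.contains_cons, BEq.rfl, Bool.true_or, if_true, h1,
        PySem.List.slice_to_natCast, PySem.List.slice_from_natCast, insAfter,
        List.take_succ_cons, List.take_zero, List.drop_succ_cons, List.drop_zero]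
      rfl
    · rw [PySem.List.index?_cons_of_ne r (show c ≠ "text" from ht)]
      by_cases hm : r.contains "text"
      · have hsome : ∃ k, PySem.List.index? r "text" = some k := by
          have := (PySem.List.index?_isSome_iff (xs := r) (v := "text")).2 (by simpa using hm)
          exact Option.isSome_iff_exists.mp this
        obtain ⟨k, hk⟩ := hsome
        rw [hk] at ih ⊢
        simp only [hm, if_true] at ih
        have hm' : "text" ∈ r := by simpa using hm
        have hc : (c :: r).contains "text" = true := by simp [hm']
        have h2 : (((k + 1 : Nat)) : Int) + 1 = (((k + 1 + 1 : Nat)) : Int) := by push_cast; ring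
        have h3 : ((k : Int) + 1) = (((k + 1 : Nat)) : Int) := by push_cast; ring
        simp only [hc, if_true, Option.map_some]
        rw [h2, PySem.List.slice_to_natCast, PySem.List.slice_from_natCast,
          List.take_succ_cons, List.drop_succ_cons]
        rw [h3, PySem.List.slice_to_natCast, PySem.List.slice_from_natCast] at ih
        simp only [insAfter, ht, if_false, ← ih]
        simp
      · have hn : PySem.List.index? r "text" = none := by
          rw [PySem.List.index?_eq_none_iff]; simpa using hm
        have hc : (c :: r).contains "text" = false := by
          simp
          exact ⟨fun h => ht h.symm, by simpa using hm⟩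
        simp only [hn, hm, Bool.false_eq_true, if_false] at ih
        simp only [hc, Bool.false_eq_true, if_false, insAfter, ht, if_false, ← ih]
        simp

-- ===== VERDICT (by name: the statement is the Claim_ definition above) =====
theorem build_output_columns_spec : Claim_equal_build_output_columns := by
  intro batch_columns save_all_columns _
  unfold Spec_build_output_columns build_output_columns build_output_columns_alt
  cases save_all_columns with
  | false => rfl
  | true =>
    simp only [Bool.not_true, Bool.false_eq_true, if_false]
    rw [bocGo_false, ← splice_eq_insAfter]
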